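-- pv_equiv track=rewrite | github.com/MyayKhway/aoc2023py | day3/day32.py | digit_search
-- ===== SOURCE A (Python) =====
-- def digit_search(line):
--         digit_start = False
--         digit_start_index = 0
--         digit_index_arr = []
--         for i in range(len(line)):
--             if digit_start:
--                 if not line[i].isalnum():
--                     # digit end
--                     digit_start = False
--                     digit_index_arr.append((digit_start_index, i-1))
--             else:
--                 if line[i].isdigit():
--                     digit_start = True
--                     digit_start_index = i
--         return digit_index_arr
-- ===== SOURCE B (Python) =====
-- def digit_search(line):
--     res = []
--     n = len(line)
--     i = 0
--     while i < n:
--         if not line[i].isalnum():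
--             i += 1
--             continue
--         j = i
--         while j < n and line[j].isalnum():
--             j += 1
--         # maximal alnum block line[i:j]
--         if j < n:
--             for k in range(i, j):
--                 if line[k].isdigit():
--                     res.append((k, j - 1))
--                     break
--         i = j
--     return res
-- ===== Notes on version B (the rewrite author's own statement) =====
-- stated objective: alternative
-- what changed: Replaced A's single-pass boolean state machine (digit_start flag updated per character) by a block decomposition: skip non-alnum characters, consume each maximal alnum block at once, and emit (first digit index, block end) only when a character follows the block.
import Mathlib
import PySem

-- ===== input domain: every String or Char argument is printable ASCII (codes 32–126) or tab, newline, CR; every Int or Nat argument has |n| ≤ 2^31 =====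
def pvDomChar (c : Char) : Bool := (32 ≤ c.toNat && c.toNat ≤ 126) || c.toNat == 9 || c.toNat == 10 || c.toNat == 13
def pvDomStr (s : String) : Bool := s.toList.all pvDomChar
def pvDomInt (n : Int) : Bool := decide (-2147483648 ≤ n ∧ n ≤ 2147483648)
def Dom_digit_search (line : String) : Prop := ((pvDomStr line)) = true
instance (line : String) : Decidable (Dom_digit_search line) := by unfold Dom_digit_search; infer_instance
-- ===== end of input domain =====

-- B replaces A's one-pass boolean state machine by a block decomposition (maximal alnum
-- blocks, emit first-digit..block-end when a char follows the block); objective: alternative.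

-- ===== PORT A =====
-- A's for-loop over range(len(line)) with state (digit_start, digit_start_index, arr),
-- transcribed as structural recursion over the characters carrying the index i.
def digitLoopA : List Char → Int → Bool → Int → List (Int × Int)
  | [], _, _, _ => []
  | c :: t, i, st, s =>
    if st then
      if ¬ PySem.Chars.isalnum c then (s, i - 1) :: digitLoopA t (i + 1) false s
      else digitLoopA t (i + 1) true s
    else
      if PySem.Chars.isdigit c then digitLoopA t (i + 1) true i
      else digitLoopA t (i + 1) false s

def digit_search (line : String) : List (Int × Int) :=
  digitLoopA line.toList 0 false 0

-- ===== PORT B =====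
-- Source B's outer while-loop: skip a non-alnum char, or consume the maximal alnum block
-- starting here (inner while = takeWhile/dropWhile), emitting (first digit index, block end)
-- when a character follows the block (j < n).
-- fuel = number of characters still allowed to be consumed (the while-loop's i < n bound);
-- it only makes the recursion structural, every call is made with enough fuel
def digitLoopB : Nat → List Char → Int → List (Int × Int)
  | 0, _, _ => []
  | _ + 1, [], _ => []
  | fuel + 1, c :: t, pos =>
    if PySem.Chars.isalnum c then
      let blk := c :: t.takeWhile PySem.Chars.isalnum
      let rest := t.dropWhile PySem.Chars.isalnum
      (if rest.isEmpty then []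
       else
         match blk.findIdx? PySem.Chars.isdigit with
         | some k => [((pos + (k : Int)), pos + (blk.length : Int) - 1)]
         | none => []) ++ digitLoopB fuel rest (pos + blk.length)
    else digitLoopB fuel t (pos + 1)

def digit_search_alt (line : String) : List (Int × Int) :=
  digitLoopB line.toList.length line.toList 0

-- ===== PRECONDITION & SPEC =====
def Spec_digit_search (line : String) (out : List (Int × Int)) : Prop := out = digit_search_alt line
instance (line : String) (out : List (Int × Int)) : Decidable (Spec_digit_search line out) := by unfold Spec_digit_search; infer_instance

-- ===== CLAIM (what is proved, stated in full; the proofs are below) =====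
def Claim_equal_digit_search : Prop := ∀ (line : String), Dom_digit_search line → Spec_digit_search line (digit_search line)

-- ===== LEMMAS AND PROOFS =====

-- a digit character is alphanumeric
lemma pv_digit_alnum {c : Char} (h : PySem.Chars.isdigit c = true) :
    PySem.Chars.isalnum c = true := by
  simp [PySem.Chars.isalnum, h]

lemma pv_dropWhile_head_false {α : Type} {p : α → Bool} :
    ∀ (l : List α) (r : α) (t' : List α), l.dropWhile p = r :: t' → p r = false := by
  intro l
  induction l with
  | nil => intro r t' h; simp [List.dropWhile] at h
  | cons a l ih =>
    intro r t' h
    by_cases hp : p a = true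
    · rw [List.dropWhile_cons_of_pos hp] at h; exact ih r t' h
    · rw [List.dropWhile_cons_of_neg hp] at h
      cases h; simpa using hp

-- the step equations of A's loop
lemma pv_A_run_stop {r : Char} {t : List Char} {i s : Int}
    (hr : PySem.Chars.isalnum r = false) :
    digitLoopA (r :: t) i true s = (s, i - 1) :: digitLoopA t (i + 1) false s := by
  simp [digitLoopA, hr]

lemma pv_A_run_go {c : Char} {t : List Char} {i s : Int}
    (hc : PySem.Chars.isalnum c = true) :
    digitLoopA (c :: t) i true s = digitLoopA t (i + 1) true s := by
  simp [digitLoopA, hc]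

lemma pv_A_idle_digit {c : Char} {t : List Char} {i s : Int}
    (hc : PySem.Chars.isdigit c = true) :
    digitLoopA (c :: t) i false s = digitLoopA t (i + 1) true i := by
  simp [digitLoopA, hc]

lemma pv_A_idle_skip {c : Char} {t : List Char} {i s : Int}
    (hc : PySem.Chars.isdigit c = false) :
    digitLoopA (c :: t) i false s = digitLoopA t (i + 1) false s := by
  simp [digitLoopA, hc]

-- the step equations of B's loop
lemma pv_B_nil : ∀ (f : Nat) (pos : Int), digitLoopB f [] pos = [] := by
  intro f pos; cases f <;> simp [digitLoopB]

lemma pv_B_skip {c : Char} {t : List Char} {pos : Int} {f : Nat}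
    (hc : PySem.Chars.isalnum c = false) :
    digitLoopB (f + 1) (c :: t) pos = digitLoopB f t (pos + 1) := by
  rw [digitLoopB]; simp [hc]

lemma pv_B_block {c : Char} {t : List Char} {pos : Int} {f : Nat}
    (hc : PySem.Chars.isalnum c = true) :
    digitLoopB (f + 1) (c :: t) pos =
      (if (t.dropWhile PySem.Chars.isalnum).isEmpty then []
       else
         match (c :: t.takeWhile PySem.Chars.isalnum).findIdx? PySem.Chars.isdigit with
         | some k => [((pos + (k : Int)),
             pos + ((c :: t.takeWhile PySem.Chars.isalnum).length : Int) - 1)]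
         | none => [])
      ++ digitLoopB f (t.dropWhile PySem.Chars.isalnum)
          (pos + ((c :: t.takeWhile PySem.Chars.isalnum).length : Int)) := by
  rw [digitLoopB]; simp [hc]

-- A's in-run state passes through a block of alphanumeric characters unchanged
lemma pv_A_run : ∀ (blk : List Char) (rest : List Char) (i s : Int),
    (∀ c ∈ blk, PySem.Chars.isalnum c = true) →
    digitLoopA (blk ++ rest) i true s = digitLoopA rest (i + blk.length) true s := by
  intro blk
  induction blk with
  | nil => intro rest i s _; simp
  | cons b bs ih =>
    intro rest i s hb
    rw [List.cons_append, pv_A_run_go (hb b (by simp)),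
        ih rest (i + 1) s (fun c hc => hb c (by simp [hc]))]
    congr 1
    simp only [List.length_cons]
    push_cast
    ring

-- out-of-run state through an all-alnum block with a trailing non-alnum character
lemma pv_A_block : ∀ (blk : List Char) (r : Char) (t' : List Char) (i s : Int),
    (∀ c ∈ blk, PySem.Chars.isalnum c = true) → PySem.Chars.isalnum r = false →
    digitLoopA (blk ++ r :: t') i false s =
      (match blk.findIdx? PySem.Chars.isdigit with
       | none => digitLoopA (r :: t') (i + blk.length) false s
       | some k => (i + (k : Int), i + (blk.length : Int) - 1) ::
           digitLoopA t' (i + blk.length + 1) false (i + k)) := by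
  intro blk
  induction blk with
  | nil => intro r t' i s _ _; simp [List.findIdx?_nil]
  | cons b bs ih =>
    intro r t' i s hb hr
    by_cases hd : PySem.Chars.isdigit b = true
    · rw [List.cons_append, pv_A_idle_digit hd,
          pv_A_run bs (r :: t') (i + 1) i (fun c hc => hb c (by simp [hc])),
          pv_A_run_stop hr]
      simp only [List.findIdx?_cons, hd, if_pos, List.length_cons]
      push_cast
      ring_nf
    · have hd' : PySem.Chars.isdigit b = false := by simpa using hd
      rw [List.cons_append, pv_A_idle_skip hd',
          ih r t' (i + 1) s (fun c hc => hb c (by simp [hc])) hr]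
      cases hfi : List.findIdx? PySem.Chars.isdigit bs with
      | none =>
        simp only [hfi, List.findIdx?_cons, hd', Bool.false_eq_true, if_false,
          Option.map_none, List.length_cons]
        congr 1
        push_cast
        ring
      | some k =>
        simp only [hfi, List.findIdx?_cons, hd', Bool.false_eq_true, if_false,
          Option.map_some, List.length_cons]
        push_cast
        ring_nf

-- an all-alnum suffix with nothing after it produces nothing from the out-of-run state
lemma pv_A_block_nil : ∀ (blk : List Char) (i s : Int),
    (∀ c ∈ blk, PySem.Chars.isalnum c = true) →
    digitLoopA blk i false s = [] := by
  intro blk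
  induction blk with
  | nil => intro i s _; simp [digitLoopA]
  | cons b bs ih =>
    intro i s hb
    by_cases hd : PySem.Chars.isdigit b = true
    · rw [pv_A_idle_digit hd]
      have h := pv_A_run bs [] (i + 1) i (fun c hc => hb c (by simp [hc]))
      simpa [digitLoopA] using h
    · rw [pv_A_idle_skip (by simpa using hd)]
      exact ih (i + 1) s (fun c hc => hb c (by simp [hc]))

-- main induction (on a length bound, since B consumes a whole block per step)
lemma pv_main : ∀ (n : Nat) (cs : List Char) (fuel : Nat), cs.length ≤ n → cs.length ≤ fuel →
    ∀ (pos s : Int), digitLoopA cs pos false s = digitLoopB fuel cs pos := by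
  intro n
  induction n with
  | zero =>
    intro cs fuel hcs _ pos s
    have h : cs = [] := List.eq_nil_of_length_eq_zero (Nat.le_zero.mp hcs)
    subst h; simp [digitLoopA, pv_B_nil]
  | succ n ih =>
    intro cs fuel hcs hfuel pos s
    match cs with
    | [] => simp [digitLoopA, pv_B_nil]
    | c :: t =>
      obtain ⟨f, rfl⟩ : ∃ f, fuel = f + 1 :=
        ⟨fuel - 1, by simp only [List.length_cons] at hfuel; omega⟩
      have hft : t.length ≤ f := by simp only [List.length_cons] at hfuel; omega
      by_cases hc : PySem.Chars.isalnum c = true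
      · -- c starts a maximal alnum block
        have hblk : ∀ x ∈ c :: t.takeWhile PySem.Chars.isalnum,
            PySem.Chars.isalnum x = true := by
          intro x hx
          rcases List.mem_cons.mp hx with h | h
          · subst h; exact hc
          · exact List.mem_takeWhile_imp h
        have hsplit : t.takeWhile PySem.Chars.isalnum ++ t.dropWhile PySem.Chars.isalnum = t :=
          List.takeWhile_append_dropWhile
        rw [pv_B_block hc]
        cases hrest : t.dropWhile PySem.Chars.isalnum with
        | nil =>
          have ht : t = t.takeWhile PySem.Chars.isalnum := by
            conv_lhs => rw [← hsplit, hrest, List.append_nil]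
          have hallt : ∀ x ∈ c :: t, PySem.Chars.isalnum x = true := by
            rw [ht]; exact hblk
          rw [pv_A_block_nil (c :: t) pos s hallt]
          simp [pv_B_nil]
        | cons r t' =>
          have hrF : PySem.Chars.isalnum r = false := pv_dropWhile_head_false t r t' hrest
          have hrD : PySem.Chars.isdigit r = false := by
            by_contra h
            exact absurd (pv_digit_alnum (by simpa using h)) (by simp [hrF])
          have hlen : t'.length ≤ n := by
            have h1 : (r :: t').length ≤ t.length := by
              rw [← hrest]; exact List.length_dropWhile_le _ _
            have h2 : (c :: t).length ≤ n + 1 := hcs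
            simp only [List.length_cons] at h1 h2
            omega
          have hA : digitLoopA (c :: t) pos false s
              = digitLoopA ((c :: t.takeWhile PySem.Chars.isalnum) ++ r :: t') pos false s := by
            rw [List.cons_append,
              show t.takeWhile PySem.Chars.isalnum ++ r :: t' = t from by rw [← hrest]; exact hsplit]
          obtain ⟨f', rfl⟩ : ∃ f', f = f' + 1 := by
            refine ⟨f - 1, ?_⟩
            have h1 : (r :: t').length ≤ t.length := by
              rw [← hrest]; exact List.length_dropWhile_le _ _
            simp only [List.length_cons] at h1
            omega
          have hft' : t'.length ≤ f' := by
            have h1 : (r :: t').length ≤ t.length := by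
              rw [← hrest]; exact List.length_dropWhile_le _ _
            simp only [List.length_cons] at h1 hft
            omega
          rw [hA, pv_A_block (c :: t.takeWhile PySem.Chars.isalnum) r t' pos s hblk hrF,
            pv_B_skip hrF]
          cases hfi : (c :: t.takeWhile PySem.Chars.isalnum).findIdx? PySem.Chars.isdigit with
          | none =>
            simp only [List.isEmpty_cons, Bool.false_eq_true, if_false, List.nil_append]
            rw [pv_A_idle_skip hrD,
              ih t' f' hlen hft' (pos + ((c :: t.takeWhile PySem.Chars.isalnum).length : Int) + 1) s]
          | some k =>
            simp only [List.isEmpty_cons, Bool.false_eq_true, if_false, List.cons_append,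
              List.nil_append]
            rw [ih t' f' hlen hft' (pos + ((c :: t.takeWhile PySem.Chars.isalnum).length : Int) + 1)
              (pos + (k : Int))]
      · have hc' : PySem.Chars.isalnum c = false := by simpa using hc
        have hd : PySem.Chars.isdigit c = false := by
          by_contra h
          exact absurd (pv_digit_alnum (by simpa using h)) (by simp [hc'])
        rw [pv_A_idle_skip hd, pv_B_skip hc']
        exact ih t f (by simp only [List.length_cons] at hcs; omega) hft (pos + 1) s

-- ===== VERDICT (by name: the statement is the Claim_ definition above) =====
theorem digit_search_spec : Claim_equal_digit_search := by
  intro line _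
  unfold Spec_digit_search digit_search digit_search_alt
  exact pv_main line.toList.length line.toList line.toList.length le_rfl le_rfl 0 0
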